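-- pv_equiv track=rewrite | github.com/Kuneosu/Vscode | 백준/ACM호텔.py | room
-- ===== SOURCE A (Python) =====
-- def room(h,w,n):
--     floor = 0
--     number = 1
--     for i in range(n):
--         floor += 1
--         if floor > h :
--             floor = 1
--             number += 1
--     floor *= 100
--     room = floor + number
--     return room
-- ===== SOURCE B (Python) =====
-- def room(h, w, n):
--     number, floor = divmod(n - 1, h)
--     return (floor + 1) * 100 + number + 1
-- ===== Notes on version B (the rewrite author's own statement) =====
-- stated objective: faster
-- what changed: replaces the O(n) floor-counting loop by one divmod: floor=(n-1)%h+1, number=(n-1)//h+1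
-- intended difference: for n <= 0 (no guest to place) A returns its leftover initial state 1 = 0*100+1, which is no room number, while B returns the closed form's natural arithmetic extension ((n-1)%h+1)*100+(n-1)//h+1 on this unspecified corner — e.g. on room(3, 0, 0): A returns 1, B returns 300
-- outside the precondition, e.g. on room(0, 0, 3): A returns 104, B raises ZeroDivisionError; on room(-2, 0, 3): A returns 104, B returns 100
import Mathlib
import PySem

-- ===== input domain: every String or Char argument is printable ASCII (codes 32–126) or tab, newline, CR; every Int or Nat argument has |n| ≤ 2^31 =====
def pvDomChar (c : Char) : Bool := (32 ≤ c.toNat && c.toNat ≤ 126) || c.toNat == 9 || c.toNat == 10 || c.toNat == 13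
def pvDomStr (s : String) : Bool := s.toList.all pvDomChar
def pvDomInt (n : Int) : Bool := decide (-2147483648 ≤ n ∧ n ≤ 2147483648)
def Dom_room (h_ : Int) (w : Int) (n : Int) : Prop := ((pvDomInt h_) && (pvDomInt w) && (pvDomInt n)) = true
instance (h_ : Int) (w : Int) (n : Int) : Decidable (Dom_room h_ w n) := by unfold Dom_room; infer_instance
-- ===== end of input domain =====

-- B replaces A's O(n) floor-counting loop by one divmod (O(1)); proved equal on the natural domain h ≥ 1, n ≥ 1.

-- ===== PORT A =====
def room (h_ : Int) (w : Int) (n : Int) : Int :=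
  let s := (PySem.List.pyRange 0 n 1).foldl
    (fun (st : Int × Int) _ =>
      let floor := st.1 + 1
      if floor > h_ then (1, st.2 + 1) else (floor, st.2))
    (0, 1)
  s.1 * 100 + s.2

-- ===== PORT B =====
def room_alt (h_ : Int) (w : Int) (n : Int) : Int :=
  let number := PySem.Int.floordiv (n - 1) h_
  let floor := PySem.Int.mod (n - 1) h_
  (floor + 1) * 100 + (number + 1)

-- ===== PRECONDITION & SPEC =====
-- Pre_ excludes h_ <= 0 only: B's divmod raises ZeroDivisionError at h_ = 0, and for h_ < 0
-- A's reset-every-step count matches no arithmetic reading of the problem; h_ >= 1 is the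
-- problem's natural domain (a hotel has at least one floor).
def Pre_room (h_ : Int) (w : Int) (n : Int) : Prop := 1 ≤ h_
instance (h_ : Int) (w : Int) (n : Int) : Decidable (Pre_room h_ w n) := by unfold Pre_room; infer_instance
def pvWitness_room : Int × Int × Int := (3, 0, 10)
-- For n ≤ 0 (no guest to place) A returns the leftover initial state 1 = 0*100 + 1, which is
-- not a room number; B returns the closed form's natural extension ((n-1)%h+1)*100 + (n-1)//h + 1,
-- the value the arithmetic reading gives on this unspecified corner.
def D_room (h_ : Int) (w : Int) (n : Int) : Prop := n ≤ 0
instance (h_ : Int) (w : Int) (n : Int) : Decidable (D_room h_ w n) := by unfold D_room; infer_instance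
def Spec_room (h_ : Int) (w : Int) (n : Int) (out : Int) : Prop := ¬ D_room h_ w n → out = room_alt h_ w n
instance (h_ : Int) (w : Int) (n : Int) (out : Int) : Decidable (Spec_room h_ w n out) := by unfold Spec_room; infer_instance
def pvDiffWitness_room : Int × Int × Int := (3, 0, 0)
def pvDiffWitnessOut_room : Int × Int := (1, 300)

-- ===== CLAIM (what is proved, stated in full; the proofs are below) =====
def Claim_unchanged_room : Prop := ∀ (h_ : Int) (w : Int) (n : Int), Dom_room h_ w n → Pre_room h_ w n → Spec_room h_ w n (room h_ w n)
def Claim_changed_room : Prop := Dom_room (pvDiffWitness_room.1) (pvDiffWitness_room.2.1) (pvDiffWitness_room.2.2) ∧ Pre_room (pvDiffWitness_room.1) (pvDiffWitness_room.2.1) (pvDiffWitness_room.2.2) ∧ D_room (pvDiffWitness_room.1) (pvDiffWitness_room.2.1) (pvDiffWitness_room.2.2) ∧ room (pvDiffWitness_room.1) (pvDiffWitness_room.2.1) (pvDiffWitness_room.2.2) = pvDiffWitnessOut_room.1 ∧ room_alt (pvDiffWitness_room.1) (pvDiffWitness_room.2.1) (pvDiffWitness_room.2.2) = pvDiffWitnessOut_room.2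 ∧ pvDiffWitnessOut_room.1 ≠ pvDiffWitnessOut_room.2

-- ===== LEMMAS AND PROOFS =====

-- the loop body of A
def roomStep (h_ : Int) (st : Int × Int) : Int × Int :=
  let floor := st.1 + 1
  if floor > h_ then (1, st.2 + 1) else (floor, st.2)

-- loop invariant: after k+1 iterations the state is (k % h + 1, k / h + 1)
theorem roomLoop_inv (h_ : Int) (hh : 1 ≤ h_) (k : Nat) :
    (PySem.List.pyRange 0 ((k : Int) + 1) 1).foldl (fun st _ => roomStep h_ st) (0, 1)
      = ((k : Int) % h_ + 1, (k : Int) / h_ + 1) := by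
  induction k with
  | zero =>
      rw [show ((0 : Nat) : Int) + 1 = 0 + 1 by norm_num,
          PySem.List.pyRange_one_singleton]
      simp only [List.foldl_cons, List.foldl_nil, roomStep]
      rw [if_neg (by omega)]
      norm_num
  | succ k ih =>
      rw [show ((k + 1 : Nat) : Int) + 1 = ((k : Int) + 1) + 1 by push_cast; ring,
          PySem.List.pyRange_one_succ_right (by positivity)]
      rw [List.foldl_append, ih]
      simp only [List.foldl_cons, List.foldl_nil, roomStep]
      have hpos : 0 < h_ := by omega
      have hlt : (k : Int) % h_ < h_ := Int.emod_lt_of_pos _ hpos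
      have hge : 0 ≤ (k : Int) % h_ := Int.emod_nonneg _ (by omega)
      have e := Int.emod_add_mul_ediv (k : Int) h_
      push_cast
      by_cases hc : (k : Int) % h_ + 1 + 1 > h_
      · rw [if_pos hc]
        have eq1 : (0 : Int) + h_ * ((k : Int) / h_ + 1) = (k : Int) + 1 := by
          rw [mul_add, mul_one]; omega
        obtain ⟨hd, hm⟩ := (Int.ediv_emod_unique hpos).mpr ⟨eq1, le_refl 0, hpos⟩
        rw [hd, hm]
        norm_num
      · rw [if_neg hc]
        have eq1 : ((k : Int) % h_ + 1) + h_ * ((k : Int) / h_) = (k : Int) + 1 := by omega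
        obtain ⟨hd, hm⟩ := (Int.ediv_emod_unique hpos).mpr ⟨eq1, by omega, by omega⟩
        rw [hd, hm]

-- ===== VERDICT (by name: the statement is the Claim_ definition above) =====
theorem room_spec : Claim_unchanged_room := by
  intro h_ w n _ hh hnd
  have hn : 1 ≤ n := by unfold D_room at hnd; omega
  replace hh : 1 ≤ h_ := hh
  unfold room room_alt
  obtain ⟨k, hk⟩ : ∃ k : Nat, n = (k : Int) + 1 :=
    ⟨(n - 1).toNat, by omega⟩
  subst hk
  rw [show (fun (st : Int × Int) (_ : Int) =>
        let floor := st.1 + 1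
        if floor > h_ then (1, st.2 + 1) else (floor, st.2))
      = (fun st _ => roomStep h_ st) from rfl]
  rw [roomLoop_inv h_ hh k]
  rw [PySem.Int.floordiv_eq_ediv_of_pos (by omega), PySem.Int.mod_eq_emod_of_pos (by omega)]
  rw [show (k : Int) + 1 - 1 = (k : Int) by ring]

theorem room_changed : Claim_changed_room := by unfold Claim_changed_room; decide
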